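-- pv_equiv track=rewrite | github.com/Kyoo032/AEGIS | scripts/normalize_payload_metadata.py | _insert_index
-- ===== SOURCE A (Python) =====
-- def _insert_index(block: list[str]) -> int:
--     for index, line in enumerate(block):
--         if line.startswith("    metadata:"):
--             return index
--     for index, line in enumerate(block):
--         if line.startswith("    severity:"):
--             return index + 1
--     return 1
-- ===== SOURCE B (Python) =====
-- def _insert_index(block: list[str]) -> int:
--     severity_index = None
--     for i, line in enumerate(block):
--         if line.startswith("    metadata:"):
--             return i
--         if severity_index is None and line.startswith("    severity:"):
--             severity_index = i
--     return severity_index + 1 if severity_index is not None else 1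
-- ===== Notes on version B (the rewrite author's own statement) =====
-- stated objective: alternative
-- what changed: Replaces A's two sequential scans (metadata scan, then severity scan) with one single pass that returns at the first metadata line and maintains the first-severity index as an accumulator.
import Mathlib
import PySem

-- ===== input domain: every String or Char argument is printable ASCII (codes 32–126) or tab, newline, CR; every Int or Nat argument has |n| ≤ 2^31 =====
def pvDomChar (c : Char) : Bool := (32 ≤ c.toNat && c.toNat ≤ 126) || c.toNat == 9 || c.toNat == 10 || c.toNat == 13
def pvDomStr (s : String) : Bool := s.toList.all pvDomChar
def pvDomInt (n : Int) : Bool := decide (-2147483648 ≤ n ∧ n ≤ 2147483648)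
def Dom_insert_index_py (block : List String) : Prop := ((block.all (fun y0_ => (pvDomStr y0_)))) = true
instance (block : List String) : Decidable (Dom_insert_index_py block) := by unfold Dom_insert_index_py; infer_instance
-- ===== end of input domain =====

-- B: one single pass maintaining the first-severity index, instead of A's two sequential scans (alternative decomposition, same cost).

-- ===== PORT A =====
-- loop 1: first scan, returns the index of the first "    metadata:" line
def pvScanMeta : List String → Int → Option Int
  | [], _ => none
  | l :: ls, i =>
    if PySem.Str.startswith l "    metadata:" then some i else pvScanMeta ls (i + 1)

-- loop 2: second scan, returns (index + 1) of the first "    severity:" line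
def pvScanSev : List String → Int → Option Int
  | [], _ => none
  | l :: ls, i =>
    if PySem.Str.startswith l "    severity:" then some (i + 1) else pvScanSev ls (i + 1)

def insert_index_py (block : List String) : Int :=
  match pvScanMeta block 0 with
  | some m => m
  | none =>
    match pvScanSev block 0 with
    | some s => s
    | none => 1

-- ===== PORT B =====
-- single pass: return at the first metadata line; remember the FIRST severity index
def pvOnePass : List String → Int → Option Int → Int
  | [], _, sev => match sev with | some s => s + 1 | none => 1
  | l :: ls, i, sev =>
    if PySem.Str.startswith l "    metadata:" then i
    else pvOnePass ls (i + 1)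
      (if sev.isNone && PySem.Str.startswith l "    severity:" then some i else sev)

def insert_index_py_alt (block : List String) : Int :=
  pvOnePass block 0 none

-- ===== PRECONDITION & SPEC =====
def Spec_insert_index_py (block : List String) (out : Int) : Prop := out = insert_index_py_alt block
instance (block : List String) (out : Int) : Decidable (Spec_insert_index_py block out) := by unfold Spec_insert_index_py; infer_instance

-- ===== CLAIM (what is proved, stated in full; the proofs are below) =====
def Claim_equal_insert_index_py : Prop := ∀ (block : List String), Dom_insert_index_py block → Spec_insert_index_py block (insert_index_py block)

-- ===== LEMMAS AND PROOFS =====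

theorem pvOnePass_eq (ls : List String) : ∀ (i : Int) (sev : Option Int),
    pvOnePass ls i sev =
      match pvScanMeta ls i with
      | some m => m
      | none =>
        match sev with
        | some s => s + 1
        | none => match pvScanSev ls i with | some s => s | none => 1 := by
  induction ls with
  | nil => intro i sev; cases sev <;> simp [pvOnePass, pvScanMeta, pvScanSev]
  | cons l ls ih =>
    intro i sev
    simp only [pvOnePass, pvScanMeta, pvScanSev]
    cases hm : PySem.Chars.startswith l.toList [' ', ' ', ' ', ' ', 'm', 'e', 't', 'a', 'd', 'a', 't', 'a', ':'] with
    | true => simp [hm]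
    | false =>
      simp only [ih]
      cases sev with
      | some s => simp [hm]
      | none =>
        cases hs : PySem.Chars.startswith l.toList [' ', ' ', ' ', ' ', 's', 'e', 'v', 'e', 'r', 'i', 't', 'y', ':'] with
        | true => simp [hm, hs]
        | false => simp [hm, hs]

-- ===== VERDICT (by name: the statement is the Claim_ definition above) =====
theorem insert_index_py_spec : Claim_equal_insert_index_py := by
  intro block _
  unfold Spec_insert_index_py insert_index_py insert_index_py_alt
  rw [pvOnePass_eq]
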